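-- pv_equiv track=rewrite | github.com/ArthurJraghatspanyan/AI | Homeworks/Fundamentals/11_31_MAR_05_APR/3_advanced_functions/hw11.py | custom_enumerate
-- ===== SOURCE A (Python) =====
-- import typing
--
-- def custom_enumerate(iterable, start=0):
--   if not isinstance(iterable, typing.Iterable):
--     raise TypeError("Type must be iterable.")
--   if not isinstance(start, int):
--     raise TypeError("Type must be integer.")
--   for i in iterable:
--     yield start, i
--     start += 1
-- ===== SOURCE B (Python) =====
-- import typing
--
-- def custom_enumerate(iterable, start=0):
--     if not isinstance(iterable, typing.Iterable):
--         raise TypeError("Type must be iterable.")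
--     if not isinstance(start, int):
--         raise TypeError("Type must be integer.")
--     items = list(iterable)
--     yield from zip(range(start, start + len(items)), items)
-- ===== Notes on version B (the rewrite author's own statement) =====
-- stated objective: alternative
-- what changed: Instead of a single loop with a mutable counter incremented per yield, B stages the work: it materialises the items, builds the whole index range(start, start+len) up front, and yields pairs from zip of the two sequences; the guards stay inside the generator so lazy TypeError timing is identical.
import Mathlib
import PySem

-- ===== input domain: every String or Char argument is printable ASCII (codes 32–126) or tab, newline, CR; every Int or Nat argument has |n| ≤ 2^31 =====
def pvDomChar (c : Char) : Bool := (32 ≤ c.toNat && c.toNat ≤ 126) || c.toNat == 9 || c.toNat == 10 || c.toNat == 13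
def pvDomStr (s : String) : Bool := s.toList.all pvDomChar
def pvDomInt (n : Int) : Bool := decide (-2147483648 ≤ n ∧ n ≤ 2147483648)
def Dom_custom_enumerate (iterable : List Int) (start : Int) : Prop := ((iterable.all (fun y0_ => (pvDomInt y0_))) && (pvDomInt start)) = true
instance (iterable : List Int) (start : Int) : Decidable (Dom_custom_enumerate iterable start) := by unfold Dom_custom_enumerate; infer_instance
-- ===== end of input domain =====

-- B stages the work (materialise items, build the full index range, zip) instead of A's loop with a
-- mutable counter; return value only — both Pythons are generators, B consumes the iterable eagerly.
-- ===== PORT A =====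
-- A: for i in iterable: yield (start, i); start += 1  — one loop carrying the mutable counter.
def custom_enumerate (iterable : List Int) (start : Int) : List (Int × Int) :=
  match iterable with
  | [] => []
  | i :: rest => (start, i) :: custom_enumerate rest (start + 1)

-- ===== PORT B =====
-- B: items = list(iterable); zip(range(start, start + len(items)), items)
def custom_enumerate_alt (iterable : List Int) (start : Int) : List (Int × Int) :=
  (PySem.List.pyRange start (start + iterable.length) 1).zip iterable

-- ===== PRECONDITION & SPEC =====
def Spec_custom_enumerate (iterable : List Int) (start : Int) (out : List (Int × Int)) : Prop := out = custom_enumerate_alt iterable start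
instance (iterable : List Int) (start : Int) (out : List (Int × Int)) : Decidable (Spec_custom_enumerate iterable start out) := by unfold Spec_custom_enumerate; infer_instance

-- ===== CLAIM (what is proved, stated in full; the proofs are below) =====
def Claim_equal_custom_enumerate : Prop := ∀ (iterable : List Int) (start : Int), Dom_custom_enumerate iterable start → Spec_custom_enumerate iterable start (custom_enumerate iterable start)

-- ===== LEMMAS AND PROOFS =====
theorem custom_enumerate_eq (iterable : List Int) (start : Int) :
    custom_enumerate iterable start = custom_enumerate_alt iterable start := by
  induction iterable generalizing start with
  | nil => simp [custom_enumerate, custom_enumerate_alt]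
  | cons x xs ih =>
    have hlen : start + ((x :: xs).length : Int) = (start + 1) + xs.length := by
      simp only [List.length_cons]; push_cast; ring
    have hcons : PySem.List.pyRange start (start + ((x :: xs).length : Int)) 1
        = start :: PySem.List.pyRange (start + 1) (start + ((x :: xs).length : Int)) 1 :=
      PySem.List.pyRange_one_cons (by simp only [List.length_cons]; push_cast; omega)
    show (start, x) :: custom_enumerate xs (start + 1)
        = (PySem.List.pyRange start (start + ((x :: xs).length : Int)) 1).zip (x :: xs)
    rw [hcons, hlen, List.zip_cons_cons, ih (start + 1)]
    rfl

-- ===== VERDICT (by name: the statement is the Claim_ definition above) =====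
theorem custom_enumerate_spec : Claim_equal_custom_enumerate := by
  intro iterable start _
  exact custom_enumerate_eq iterable start
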